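-- pv_equiv track=rewrite | github.com/reaganman/RecPhEg | Scripts/optimize_overlaps.py | recommend_no_homo
-- ===== SOURCE A (Python) =====
-- def recommend_no_homo(ov_seq, homos, max_homo_size=3, min_len=1):
--     """
--     Produce fragments for every continuous subsequence that does NOT contain
--     a homopolymer longer than max_homo_size. Fragments *keep* up to
--     `max_homo_size` bases of each trimmed homopolymer on both sides, so
--     adjacent fragments will overlap by `max_homo_size`.
--
--     Parameters
--     ----------
--     ov_seq : str
--         Original overlap sequence.
--     homos : list of (start, stop, seq)
--         Output from find_homopolymers(); start is 0-based, stop is exclusive.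
--     max_homo_size : int
--         Maximum allowed homopolymer length to keep on each side.
--     min_len : int
--         Minimum fragment length to include in the result.
--
--     Returns
--     -------
--     List[str]
--         Fragments (may overlap) each guaranteed to contain no homopolymer >
--         max_homo_size and to be at least min_len long.
--     """
--     ov_seq = ov_seq.upper()
--     if not homos:
--         return [ov_seq] if len(ov_seq) >= min_len else []
--
--     fragments = []
--     last_cut = 0
--
--     # assume homos are sorted by start; if not, sort them
--     homos_sorted = sorted(homos, key=lambda h: h[0])
--
--     for start, stop, seq in homos_sorted:
--         run_len = stop - start
--         if run_len > max_homo_size: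
--             # left fragment: from last_cut up to (and including) max_homo_size bases
--             # from the start of this homopolymer
--             left_frag = ov_seq[last_cut : start + max_homo_size]
--             if len(left_frag) >= min_len:
--                 fragments.append(left_frag)
--
--             # next fragment should begin max_homo_size bases before the end of the run,
--             # i.e. we keep max_homo_size bases of the homopolymer at the start of the next fragment
--             last_cut = max(0, stop - max_homo_size)
--
--     # final trailing fragment
--     if len(ov_seq) - last_cut >= min_len:
--         fragments.append(ov_seq[last_cut:])
--
--     return fragments
-- ===== SOURCE B (Python) =====
-- def recommend_no_homo(ov_seq, homos, max_homo_size=3, min_len=1):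
--     """Recursive rewrite: no mutable fragment list / last_cut state; the
--     fragment stream is produced by structural recursion on the list of
--     long homopolymers, each call emitting the fragment left of its head."""
--     s = ov_seq.upper()
--     if not homos:
--         return [s] if len(s) >= min_len else []
--     k = max_homo_size
--     longs = [h for h in sorted(homos, key=lambda h: h[0]) if h[1] - h[0] > k]
--
--     def emit(cut, rest):
--         # fragments of s to the right of position `cut`
--         if not rest:
--             return [s[cut:]] if len(s) - cut >= min_len else []
--         (start, stop, _), *more = rest
--         frag = s[cut : start + k]
--         head = [frag] if len(frag) >= min_len else []
--         return head + emit(max(0, stop - k), more)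
--
--     return emit(0, longs)
-- ===== Notes on version B (the rewrite author's own statement) =====
-- stated objective: alternative
-- what changed: A's imperative loop mutating a fragments list and a last_cut variable (with the length test folded inside the loop) is replaced by a pure structural recursion: the long homopolymers are selected up front and a recursive emit(cut, rest) builds the fragment list by consing, each call handling one homopolymer and the base case handling the trailing fragment.
import Mathlib
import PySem

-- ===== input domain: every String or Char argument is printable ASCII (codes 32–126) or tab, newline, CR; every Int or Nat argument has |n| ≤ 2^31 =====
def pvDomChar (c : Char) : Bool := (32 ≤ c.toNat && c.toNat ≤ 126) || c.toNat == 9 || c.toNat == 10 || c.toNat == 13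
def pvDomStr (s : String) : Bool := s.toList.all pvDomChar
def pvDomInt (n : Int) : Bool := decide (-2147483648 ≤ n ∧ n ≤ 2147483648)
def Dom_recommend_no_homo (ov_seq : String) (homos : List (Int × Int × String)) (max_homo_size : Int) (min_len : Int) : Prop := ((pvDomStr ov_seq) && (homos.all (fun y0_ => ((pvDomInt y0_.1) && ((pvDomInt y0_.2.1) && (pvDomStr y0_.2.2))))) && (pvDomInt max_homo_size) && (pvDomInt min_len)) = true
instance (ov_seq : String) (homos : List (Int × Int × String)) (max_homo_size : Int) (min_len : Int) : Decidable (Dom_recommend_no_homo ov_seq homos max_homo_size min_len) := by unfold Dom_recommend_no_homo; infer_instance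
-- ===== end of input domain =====

-- B replaces A's imperative loop over (fragments, last_cut) state by a pure
-- structural recursion over the pre-selected long homopolymers (objective: alternative).

-- ===== PORT A =====
-- A-side helper: the body of A's for-loop (state = (fragments, last_cut))
def stepA (s : String) (mhs ml : Int) (st : List String × Int) (h : Int × Int × String) : List String × Int :=
  if h.2.1 - h.1 > mhs then
    let left_frag := PySem.Str.slice s (some st.2) (some (h.1 + mhs))
    (if PySem.Str.len left_frag ≥ ml then st.1 ++ [left_frag] else st.1,
     max 0 (h.2.1 - mhs))
  else st

def recommend_no_homo (ov_seq : String) (homos : List (Int × Int × String)) (max_homo_size : Int) (min_len : Int) : List String :=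
  let s := PySem.Str.upper ov_seq
  if homos = [] then
    (if PySem.Str.len s ≥ min_len then [s] else [])
  else
    let homos_sorted := PySem.List.sorted homos (fun h => h.1)
    let st := homos_sorted.foldl (stepA s max_homo_size min_len) ([], 0)
    if PySem.Str.len s - st.2 ≥ min_len then st.1 ++ [PySem.Str.slice s (some st.2) none] else st.1

-- ===== PORT B =====
-- B-side helper: emit cut rest = the fragments of s to the right of position cut
def emitB (s : String) (k ml : Int) : Int → List (Int × Int × String) → List String
  | cut, [] =>
      if PySem.Str.len s - cut ≥ ml then [PySem.Str.slice s (some cut) none] else []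
  | cut, h :: more =>
      let frag := PySem.Str.slice s (some cut) (some (h.1 + k))
      (if PySem.Str.len frag ≥ ml then [frag] else []) ++ emitB s k ml (max 0 (h.2.1 - k)) more

def recommend_no_homo_alt (ov_seq : String) (homos : List (Int × Int × String)) (max_homo_size : Int) (min_len : Int) : List String :=
  let s := PySem.Str.upper ov_seq
  if homos = [] then
    (if PySem.Str.len s ≥ min_len then [s] else [])
  else
    let longs := (PySem.List.sorted homos (fun h => h.1)).filter
      (fun h => decide (h.2.1 - h.1 > max_homo_size))
    emitB s max_homo_size min_len 0 longs

-- ===== PRECONDITION & SPEC =====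
def Spec_recommend_no_homo (ov_seq : String) (homos : List (Int × Int × String)) (max_homo_size : Int) (min_len : Int) (out : List String) : Prop := out = recommend_no_homo_alt ov_seq homos max_homo_size min_len
instance (ov_seq : String) (homos : List (Int × Int × String)) (max_homo_size : Int) (min_len : Int) (out : List String) : Decidable (Spec_recommend_no_homo ov_seq homos max_homo_size min_len out) := by unfold Spec_recommend_no_homo; infer_instance

-- ===== CLAIM =====
def Claim_equal_recommend_no_homo : Prop := ∀ (ov_seq : String) (homos : List (Int × Int × String)) (max_homo_size : Int) (min_len : Int), Dom_recommend_no_homo ov_seq homos max_homo_size min_len → Spec_recommend_no_homo ov_seq homos max_homo_size min_len (recommend_no_homo ov_seq homos max_homo_size min_len)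

-- ===== LEMMAS AND PROOFS =====

-- stepA skips short homopolymers: A's fold over any list equals its fold over the long ones only
lemma foldl_stepA_filter (s : String) (mhs ml : Int) :
    ∀ (l : List (Int × Int × String)) (st : List String × Int),
      l.foldl (stepA s mhs ml) st
        = (l.filter (fun h => decide (h.2.1 - h.1 > mhs))).foldl (stepA s mhs ml) st := by
  intro l
  induction l with
  | nil => intro st; rfl
  | cons h t ih =>
    intro st
    by_cases hl : h.2.1 - h.1 > mhs
    · simp [hl, ih]
    · simp [hl, ih, stepA]

-- over a list of long homopolymers, A's fold + trailing step equals B's recursion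
lemma foldl_stepA_emit (s : String) (k ml : Int) :
    ∀ (l : List (Int × Int × String)), (∀ h ∈ l, h.2.1 - h.1 > k) →
      ∀ (acc : List String) (lc : Int),
      (let st := l.foldl (stepA s k ml) (acc, lc);
       if PySem.Str.len s - st.2 ≥ ml then st.1 ++ [PySem.Str.slice s (some st.2) none] else st.1)
        = acc ++ emitB s k ml lc l := by
  intro l
  induction l with
  | nil =>
    intro _ acc lc
    simp only [List.foldl_nil, emitB]
    split <;> simp
  | cons h t ih =>
    intro hlong acc lc
    have hh : h.2.1 - h.1 > k := hlong h (List.mem_cons_self ..)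
    have ht : ∀ x ∈ t, x.2.1 - x.1 > k := fun x hx => hlong x (List.mem_cons_of_mem _ hx)
    simp only [List.foldl_cons, stepA, if_pos hh, emitB]
    rw [ih ht]
    split <;> simp

-- ===== VERDICT =====
theorem recommend_no_homo_spec : Claim_equal_recommend_no_homo := by
  intro ov_seq homos max_homo_size min_len _
  unfold Spec_recommend_no_homo recommend_no_homo recommend_no_homo_alt
  by_cases hnil : homos = []
  · simp [hnil]
  · simp only [if_neg hnil]
    rw [foldl_stepA_filter]
    exact foldl_stepA_emit _ _ _ _
      (fun h hm => by simpa using List.of_mem_filter hm) [] 0
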